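-- pv_equiv track=rewrite | github.com/NickOosthuizen/CTF-Scripts | win_strings.py | preprocess_string
-- ===== SOURCE A (Python) =====
-- def preprocess_string(search_string):
--     if (len(search_string) == 0):
--         return None
--     win_string = []
--     for char in search_string:
--         win_string.append(ord(char))
--         win_string.append(0x00)
--     win_string.pop()
--     return win_string
-- ===== SOURCE B (Python) =====
-- def preprocess_string(search_string):
--     n = len(search_string)
--     if n == 0:
--         return None
--     result = [0] * (2 * n - 1)
--     result[::2] = [ord(c) for c in search_string]
--     return result
-- ===== Notes on version B (the rewrite author's own statement) =====
-- stated objective: idiomatic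
-- what changed: B preallocates a zero-filled list of the final length 2n-1 (the null separators already in place) and writes the char codes into the even slots with one strided slice assignment, instead of A's append-(code,0)-pairs-then-pop-the-sentinel loop.
import Mathlib
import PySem

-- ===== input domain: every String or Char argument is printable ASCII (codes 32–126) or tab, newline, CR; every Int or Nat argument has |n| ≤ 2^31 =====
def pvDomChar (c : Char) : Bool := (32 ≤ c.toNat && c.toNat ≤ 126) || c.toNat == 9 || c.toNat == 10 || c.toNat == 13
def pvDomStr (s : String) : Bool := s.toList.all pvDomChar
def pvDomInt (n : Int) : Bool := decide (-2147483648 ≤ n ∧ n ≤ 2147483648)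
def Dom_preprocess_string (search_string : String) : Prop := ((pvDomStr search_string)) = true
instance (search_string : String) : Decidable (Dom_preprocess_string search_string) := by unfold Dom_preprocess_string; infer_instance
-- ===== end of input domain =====

-- B preallocates the zero-filled output of length 2n-1 and writes the char codes into the
-- even slots by strided slice assignment, replacing A's append-pairs-then-pop loop (idiomatic).

-- ===== PORT A =====
def preprocess_string (search_string : String) : Option (List Int) :=
  if search_string.toList.length = 0 then none
  else
    let win_string : List Int :=
      search_string.toList.foldl (fun acc char => acc ++ [(char.toNat : Int), 0]) []
    match PySem.List.pop? win_string (-1) with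
    | some (_, rest) => some rest
    | none => none   -- unreachable: the guard makes win_string nonempty

-- ===== PORT B =====
-- Python's extended-slice assignment l[::2] = vals: replace positions 0,2,4,… by vals in order
def pvAssignEvery2 : List Int → List Int → List Int
  | l, [] => l
  | [], _ :: _ => []
  | [_], v :: _ => [v]
  | _ :: z :: rest, v :: vs => v :: z :: pvAssignEvery2 rest vs

def preprocess_string_alt (search_string : String) : Option (List Int) :=
  let n := search_string.toList.length
  if n = 0 then none
  else
    let result := List.replicate (2 * n - 1) (0 : Int)
    some (pvAssignEvery2 result (search_string.toList.map (fun c => (c.toNat : Int))))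

-- ===== PRECONDITION & SPEC =====
def Spec_preprocess_string (search_string : String) (out : Option (List Int)) : Prop := out = preprocess_string_alt search_string
instance (search_string : String) (out : Option (List Int)) : Decidable (Spec_preprocess_string search_string out) := by unfold Spec_preprocess_string; infer_instance

-- ===== CLAIM =====
def Claim_equal_preprocess_string : Prop := ∀ (search_string : String), Dom_preprocess_string search_string → Spec_preprocess_string search_string (preprocess_string search_string)

-- ===== LEMMAS AND PROOFS =====

-- both ports produce the head code followed by (0, code) pairs: B's side
theorem pv_assign_shape (cs : List Char) (c : Char) :
    pvAssignEvery2 (List.replicate (2 * cs.length + 1) (0 : Int))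
        ((c :: cs).map (fun ch => (ch.toNat : Int)))
      = (c.toNat : Int) :: cs.flatMap (fun ch => [0, (ch.toNat : Int)]) := by
  induction cs generalizing c with
  | nil => simp [pvAssignEvery2]
  | cons c' cs ih =>
    have h : 2 * (c' :: cs).length + 1 = (2 * cs.length + 1) + 1 + 1 := by
      simp [List.length_cons]; ring
    rw [h, List.replicate_succ, List.replicate_succ]
    simp only [List.map_cons, pvAssignEvery2, List.flatMap_cons]
    have h2 := ih c'
    simp only [List.map_cons] at h2
    rw [h2]; simp

-- dropping the trailing 0 of A's flatMap yields the same shape: A's side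
theorem pv_flatMap_shift (c : Char) (cs : List Char) :
    ([(c.toNat : Int), 0] ++ cs.flatMap (fun char => [(char.toNat : Int), 0])).dropLast
      = (c.toNat : Int) :: cs.flatMap (fun ch => [0, (ch.toNat : Int)]) := by
  induction cs generalizing c with
  | nil => simp
  | cons c' cs ih =>
    have h := ih c'
    simp only [List.flatMap_cons, List.cons_append, List.nil_append] at h ⊢
    rw [List.dropLast_cons_of_ne_nil (by simp), List.dropLast_cons_of_ne_nil (by simp)]
    rw [show ((c'.toNat : Int) :: 0 :: cs.flatMap (fun char => [(char.toNat : Int), 0])).dropLast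
         = (c'.toNat : Int) :: cs.flatMap (fun ch => [0, (ch.toNat : Int)]) from h]

-- Python's list.pop() on a nonempty list removes and returns the last element
theorem pv_pop_neg_one {α : Type} (l : List α) (h : l ≠ []) :
    PySem.List.pop? l (-1) = some (l.getLast h, l.dropLast) := by
  conv_lhs => rw [← List.dropLast_append_getLast h]
  rw [PySem.List.pop?_last]

-- ===== VERDICT =====
theorem preprocess_string_spec : Claim_equal_preprocess_string := by
  intro s _
  unfold Spec_preprocess_string preprocess_string preprocess_string_alt
  cases hs : s.toList with
  | nil => simp
  | cons c cs =>
    simp only [List.length_cons, Nat.succ_ne_zero, if_false]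
    rw [PySem.List.foldl_append_eq_flatMap]
    have hne : ([] ++ (c :: cs).flatMap (fun char => [(char.toNat : Int), 0])) ≠ [] := by
      simp [List.flatMap_cons]
    rw [pv_pop_neg_one _ hne]
    simp only [Option.some.injEq, List.nil_append, List.flatMap_cons]
    have hlen : 2 * (cs.length + 1) - 1 = 2 * cs.length + 1 := by omega
    rw [hlen, pv_assign_shape cs c]
    exact (pv_flatMap_shift c cs) ▸ rfl
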